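-- pv_equiv track=rewrite | github.com/Shraddhaaa05/Agentic-AI-based-Resume-Optimizer | interview_prep.py | _generate_technical_questions
-- ===== SOURCE A (Python) =====
-- from typing import List, Dict, Any
--
-- def _generate_technical_questions(resume: str) -> List[str]:
--     """Generate technical questions based on skills mentioned in resume"""
--     technical_questions = []
--     resume_lower = resume.lower()
--
--     # Programming languages
--     if any(lang in resume_lower for lang in ['python', 'java', 'c++', 'javascript']):
--         technical_questions.append("Explain your proficiency with programming languages mentioned in your resume")
--
--     # Data analysis tools
--     if any(tool in resume_lower for tool in ['sql', 'tableau', 'power bi', 'excel']):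
--         technical_questions.append("Describe your experience with data analysis and visualization tools")
--
--     # Specific technical skills
--     if 'machine learning' in resume_lower:
--         technical_questions.append("Explain a machine learning project you've worked on")
--
--     if 'cloud' in resume_lower or 'aws' in resume_lower or 'azure' in resume_lower:
--         technical_questions.append("Describe your experience with cloud platforms")
--
--     if 'agile' in resume_lower or 'scrum' in resume_lower:
--         technical_questions.append("What's your experience with Agile methodologies?")
--
--     # Add general technical questions if none specific found
--     if not technical_questions:
--         technical_questions = [
--             "What technical skills are you most confident in?",
--             "Describe a technical challenge you recently faced",
--             "How do you stay updated with industry trends and technologies?"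
--         ]
--
--     return technical_questions[:3]
-- ===== SOURCE B (Python) =====
-- from typing import List
--
-- # category id -> question, in A's branch order
-- _QUESTIONS = [
--     "Explain your proficiency with programming languages mentioned in your resume",
--     "Describe your experience with data analysis and visualization tools",
--     "Explain a machine learning project you've worked on",
--     "Describe your experience with cloud platforms",
--     "What's your experience with Agile methodologies?",
-- ]
--
-- # flat (keyword, category) pairs
-- _KEYWORDS = [
--     ("python", 0), ("java", 0), ("c++", 0), ("javascript", 0),
--     ("sql", 1), ("tableau", 1), ("power bi", 1), ("excel", 1),
--     ("machine learning", 2),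
--     ("cloud", 3), ("aws", 3), ("azure", 3),
--     ("agile", 4), ("scrum", 4),
-- ]
--
-- _FALLBACK = [
--     "What technical skills are you most confident in?",
--     "Describe a technical challenge you recently faced",
--     "How do you stay updated with industry trends and technologies?",
-- ]
--
-- def _generate_technical_questions(resume: str) -> List[str]:
--     # single left-to-right scan over the resume, matching all keywords at each
--     # position (multi-pattern scan) instead of one substring search per keyword
--     text = resume.lower()
--     found = set()
--     for i in range(len(text)):
--         for kw, cat in _KEYWORDS:
--             if cat not in found and text.startswith(kw, i):
--                 found.add(cat)
--     questions = [q for c, q in enumerate(_QUESTIONS) if c in found]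
--     if not questions:
--         questions = _FALLBACK
--     return questions[:3]
-- ===== Notes on version B (the rewrite author's own statement) =====
-- stated objective: alternative
-- what changed: Replaced the five per-category substring tests by a single left-to-right scan over the resume that matches all keywords at each position (startswith) into a set of found categories, then emits questions of found categories in table order, with the same fallback and [:3] truncation; it trades the speed of the built-in substring search for one uniform scan driven by a flat keyword table.
import Mathlib
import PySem

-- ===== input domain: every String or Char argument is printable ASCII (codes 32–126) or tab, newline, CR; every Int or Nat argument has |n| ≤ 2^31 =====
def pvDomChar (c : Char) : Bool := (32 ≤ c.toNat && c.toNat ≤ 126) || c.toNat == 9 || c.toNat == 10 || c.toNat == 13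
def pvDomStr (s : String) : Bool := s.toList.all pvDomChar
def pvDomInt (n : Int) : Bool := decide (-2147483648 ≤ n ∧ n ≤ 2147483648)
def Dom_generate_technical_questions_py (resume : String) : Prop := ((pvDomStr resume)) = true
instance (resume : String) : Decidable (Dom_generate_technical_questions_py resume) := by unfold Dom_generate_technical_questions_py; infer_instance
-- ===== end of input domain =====

-- B replaces A's five per-category substring tests by a single left-to-right scan of the
-- resume that matches all keywords at each position into a set of found categories
-- (objective: alternative); same fallback and [:3] truncation.


-- ===== PORT A =====
def generate_technical_questions_py (resume : String) : List String :=
  let resume_lower := PySem.Str.lower resume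
  let tq : List String := []
  let tq := if ["python", "java", "c++", "javascript"].any (fun lang => PySem.Str.isIn lang resume_lower)
    then tq ++ ["Explain your proficiency with programming languages mentioned in your resume"] else tq
  let tq := if ["sql", "tableau", "power bi", "excel"].any (fun tool => PySem.Str.isIn tool resume_lower)
    then tq ++ ["Describe your experience with data analysis and visualization tools"] else tq
  let tq := if PySem.Str.isIn "machine learning" resume_lower
    then tq ++ ["Explain a machine learning project you've worked on"] else tq
  let tq := if PySem.Str.isIn "cloud" resume_lower || PySem.Str.isIn "aws" resume_lower || PySem.Str.isIn "azure" resume_lower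
    then tq ++ ["Describe your experience with cloud platforms"] else tq
  let tq := if PySem.Str.isIn "agile" resume_lower || PySem.Str.isIn "scrum" resume_lower
    then tq ++ ["What's your experience with Agile methodologies?"] else tq
  let tq := if tq = [] then
      ["What technical skills are you most confident in?",
       "Describe a technical challenge you recently faced",
       "How do you stay updated with industry trends and technologies?"]
    else tq
  PySem.List.slice tq none (some 3)

-- ===== PORT B =====
def pvQuestions : List String :=
  ["Explain your proficiency with programming languages mentioned in your resume",
   "Describe your experience with data analysis and visualization tools",
   "Explain a machine learning project you've worked on",
   "Describe your experience with cloud platforms",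
   "What's your experience with Agile methodologies?"]

def pvKeywords : List (String × Int) :=
  [("python", 0), ("java", 0), ("c++", 0), ("javascript", 0),
   ("sql", 1), ("tableau", 1), ("power bi", 1), ("excel", 1),
   ("machine learning", 2),
   ("cloud", 3), ("aws", 3), ("azure", 3),
   ("agile", 4), ("scrum", 4)]

def pvFallback : List String :=
  ["What technical skills are you most confident in?",
   "Describe a technical challenge you recently faced",
   "How do you stay updated with industry trends and technologies?"]

-- the scan loop of Source B: for i in range(len(text)): for kw, cat in _KEYWORDS: …
-- (text.startswith(kw, i) for 0 ≤ i is exactly: kw is a prefix of text[i:])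
def pvFound (t : List Char) : PySem.Set Int :=
  (List.range t.length).foldl
    (fun f i => pvKeywords.foldl
       (fun f kc =>
         if !(PySem.Set.contains f kc.2) && PySem.Chars.startswith (t.drop i) kc.1.toList
         then PySem.Set.add f kc.2 else f) f)
    PySem.Set.empty

def generate_technical_questions_py_alt (resume : String) : List String :=
  let text := PySem.Str.lower resume
  let found := pvFound text.toList
  let questions :=
    ((PySem.List.enumerate pvQuestions).filter (fun p => PySem.Set.contains found p.1)).map (fun p => p.2)
  let questions := if questions = [] then pvFallback else questions
  PySem.List.slice questions none (some 3)

-- ===== PRECONDITION & SPEC =====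
def Spec_generate_technical_questions_py (resume : String) (out : List String) : Prop := out = generate_technical_questions_py_alt resume
instance (resume : String) (out : List String) : Decidable (Spec_generate_technical_questions_py resume out) := by unfold Spec_generate_technical_questions_py; infer_instance

-- ===== CLAIM (what is proved, stated in full; the proofs are below) =====
def Claim_equal_generate_technical_questions_py : Prop := ∀ (resume : String), Dom_generate_technical_questions_py resume → Spec_generate_technical_questions_py resume (generate_technical_questions_py resume)

-- ===== LEMMAS AND PROOFS =====

-- membership after the inner keyword loop at position i
theorem pv_mem_inner (t : List Char) (i : Nat) (ks : List (String × Int)) (f : PySem.Set Int) (c : Int) :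
    c ∈ ks.foldl
       (fun f kc =>
         if !(PySem.Set.contains f kc.2) && PySem.Chars.startswith (t.drop i) kc.1.toList
         then PySem.Set.add f kc.2 else f) f
    ↔ c ∈ f ∨ ∃ kc ∈ ks, kc.2 = c ∧ kc.1.toList <+: t.drop i := by
  induction ks generalizing f with
  | nil => simp
  | cons kc ks ih =>
    have hstep : c ∈ (if !(PySem.Set.contains f kc.2) && PySem.Chars.startswith (t.drop i) kc.1.toList
          then PySem.Set.add f kc.2 else f)
        ↔ c ∈ f ∨ (kc.2 = c ∧ kc.1.toList <+: t.drop i) := by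
      by_cases hs : PySem.Chars.startswith (t.drop i) kc.1.toList = true
      · by_cases hc : PySem.Set.contains f kc.2 = true
        · have hmem : kc.2 ∈ f := by simpa [PySem.Set.contains] using hc
          rw [if_neg (by simp [PySem.Set.contains, hmem])]
          constructor
          · exact fun h => Or.inl h
          · rintro (h | ⟨h2, _⟩); · exact h
            · exact h2 ▸ hmem
        · have hnm : kc.2 ∉ f := by simpa [PySem.Set.contains] using hc
          rw [if_pos (by simp [PySem.Set.contains, hnm, hs]), PySem.Set.mem_add]
          rw [PySem.Chars.startswith_iff] at hs
          constructor
          · rintro (h | h); · exact Or.inl h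
            · exact Or.inr ⟨h.symm, hs⟩
          · rintro (h | ⟨h2, _⟩); · exact Or.inl h
            · exact Or.inr h2.symm
      · rw [if_neg (by simp [hs])]
        constructor
        · exact fun h => Or.inl h
        · rintro (h | ⟨_, hp⟩); · exact h
          · exact absurd ((PySem.Chars.startswith_iff _ _).2 hp) hs
    rw [List.foldl_cons, ih, hstep]
    simp only [List.mem_cons]
    constructor
    · rintro ((h | h) | ⟨kc', hk', hh⟩)
      · exact Or.inl h
      · exact Or.inr ⟨kc, Or.inl rfl, h⟩
      · exact Or.inr ⟨kc', Or.inr hk', hh⟩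
    · rintro (h | ⟨kc', hk', hh⟩)
      · exact Or.inl (Or.inl h)
      · rcases hk' with rfl | hk'
        · exact Or.inl (Or.inr hh)
        · exact Or.inr ⟨kc', hk', hh⟩

-- membership after scanning positions 0..n-1
theorem pv_mem_scan (t : List Char) (n : Nat) (c : Int) :
    c ∈ (List.range n).foldl
       (fun f i => pvKeywords.foldl
         (fun f kc =>
           if !(PySem.Set.contains f kc.2) && PySem.Chars.startswith (t.drop i) kc.1.toList
           then PySem.Set.add f kc.2 else f) f)
       PySem.Set.empty
    ↔ ∃ i < n, ∃ kc ∈ pvKeywords, kc.2 = c ∧ kc.1.toList <+: t.drop i := by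
  induction n with
  | zero => simp [PySem.Set.empty]
  | succ n ih =>
    rw [List.range_succ, List.foldl_append, List.foldl_cons, List.foldl_nil, pv_mem_inner, ih]
    constructor
    · rintro (⟨i, hi, h⟩ | h)
      · exact ⟨i, Nat.lt_succ_of_lt hi, h⟩
      · exact ⟨n, Nat.lt_succ_self n, h⟩
    · rintro ⟨i, hi, h⟩
      rcases Nat.lt_succ_iff_lt_or_eq.1 hi with hi | rfl
      · exact Or.inl ⟨i, hi, h⟩
      · exact Or.inr h

-- a nonempty keyword is a prefix of some suffix within the length iff it is a substring
theorem pv_occurs_iff (kw t : List Char) (hkw : kw ≠ []) :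
    (∃ i < t.length, kw <+: t.drop i) ↔ PySem.Chars.isIn kw t = true := by
  rw [← PySem.Chars.exists_prefix_drop_iff_isIn]
  constructor
  · rintro ⟨i, _, h⟩; exact ⟨i, h⟩
  · rintro ⟨j, h⟩
    refine ⟨j, ?_, h⟩
    by_contra hj
    have hnil : t.drop j = [] := List.drop_eq_nil_iff.2 (Nat.le_of_not_lt hj)
    rw [hnil, List.prefix_nil] at h
    exact hkw h

-- every keyword in the table is a nonempty string
theorem pv_keywords_ne_nil : ∀ kc ∈ pvKeywords, kc.1.toList ≠ [] := by decide

-- the found set contains category c iff some keyword of category c occurs in t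
theorem pv_contains_found (t : List Char) (c : Int) :
    PySem.Set.contains (pvFound t) c
      = pvKeywords.any (fun kc => kc.2 == c && PySem.Chars.isIn kc.1.toList t) := by
  rw [Bool.eq_iff_iff, List.any_eq_true]
  have hmem : PySem.Set.contains (pvFound t) c = true ↔ c ∈ pvFound t := by
    simp [PySem.Set.contains]
  rw [hmem]
  unfold pvFound
  rw [pv_mem_scan]
  constructor
  · rintro ⟨i, hi, kc, hk, h2, hp⟩
    refine ⟨kc, hk, ?_⟩
    rw [Bool.and_eq_true, beq_iff_eq]
    exact ⟨h2, (pv_occurs_iff _ _ (pv_keywords_ne_nil kc hk)).1 ⟨i, hi, hp⟩⟩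
  · rintro ⟨kc, hk, hb⟩
    rw [Bool.and_eq_true, beq_iff_eq] at hb
    obtain ⟨i, hi, hp⟩ := (pv_occurs_iff _ _ (pv_keywords_ne_nil kc hk)).2 hb.2
    exact ⟨i, hi, kc, hk, hb.1, hp⟩

-- the filter over the enumerated question table, spelled out per entry (32 boolean cases)
theorem pv_filter_shape (P : Int × String → Bool) :
    ((PySem.List.enumerate pvQuestions).filter P).map (fun p => p.2)
    = (if P (0, "Explain your proficiency with programming languages mentioned in your resume") then ["Explain your proficiency with programming languages mentioned in your resume"] else []) ++ (if P (1, "Describe your experience with data analysis and visualization tools") then ["Describe your experience with data analysis and visualization tools"] else []) ++ (if P (2, "Explain a machine learning project you've worked on") then ["Explain a machine learning project you've worked on"] else []) ++ (if P (3, "Describe your experience with cloud platforms") then ["Describe your experience with cloud platforms"] else []) ++ (if P (4, "What's your experience with Agile methodologies?") then ["What's your experience with Agile methodologies?"] else []) := by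
  cases h0 : P (0, "Explain your proficiency with programming languages mentioned in your resume") <;>
  cases h1 : P (1, "Describe your experience with data analysis and visualization tools") <;>
  cases h2 : P (2, "Explain a machine learning project you've worked on") <;>
  cases h3 : P (3, "Describe your experience with cloud platforms") <;>
  cases h4 : P (4, "What's your experience with Agile methodologies?") <;>
  simp [pvQuestions, PySem.List.enumerate_cons, PySem.List.enumerate_nil,
    List.filter_nil, h0, h1, h2, h3, h4]

-- final shape lemma: A's if/append chain equals B's per-category concatenation,
-- with the five conditions abstract (32 boolean cases, all by rfl)
theorem pv_final (c1 c2 c3 c4 c5 : Bool) :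
    (let t1 := if c1 then ["Explain your proficiency with programming languages mentioned in your resume"] else ([] : List String)
     let t2 := if c2 then t1 ++ ["Describe your experience with data analysis and visualization tools"] else t1
     let t3 := if c3 then t2 ++ ["Explain a machine learning project you've worked on"] else t2
     let t4 := if c4 then t3 ++ ["Describe your experience with cloud platforms"] else t3
     let t5 := if c5 then t4 ++ ["What's your experience with Agile methodologies?"] else t4
     let t6 := if t5 = [] then pvFallback else t5
     PySem.List.slice t6 none (some 3))
    = (let q1 := (if c1 then ["Explain your proficiency with programming languages mentioned in your resume"] else []) ++ (if c2 then ["Describe your experience with data analysis and visualization tools"] else []) ++ (if c3 then ["Explain a machine learning project you've worked on"] else []) ++ (if c4 then ["Describe your experience with cloud platforms"] else []) ++ (if c5 then ["What's your experience with Agile methodologies?"] else [])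
       let q2 := if q1 = [] then pvFallback else q1
       PySem.List.slice q2 none (some 3)) := by
  cases c1 <;> cases c2 <;> cases c3 <;> cases c4 <;> cases c5 <;> rfl

-- ===== VERDICT (by name: the statement is the Claim_ definition above) =====
theorem generate_technical_questions_py_spec : Claim_equal_generate_technical_questions_py := by
  intro resume _
  unfold Spec_generate_technical_questions_py generate_technical_questions_py
    generate_technical_questions_py_alt
  simp only [pv_filter_shape, pv_contains_found]
  simp only [pvKeywords, List.any_cons, List.any_nil, PySem.Str.isIn_eq, PySem.Str.toList_lower,
    Int.reduceBEq, beq_self_eq_true, Bool.true_and, Bool.false_and, Bool.or_false, Bool.false_or,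
    Bool.or_assoc, List.nil_append]
  exact pv_final _ _ _ _ _
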